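-- pv_equiv track=rewrite | github.com/rand/ananke-sglang | python/sglang/srt/constrained/ananke/domains/types/languages/swift.py | _find_arrow
-- ===== SOURCE A (Python) =====
-- def _find_arrow(text: str) -> int:
--     """Find -> respecting brackets."""
--     depth = 0
--     for i in range(len(text) - 1):
--         if text[i] in "(<[":
--             depth += 1
--         elif text[i] in ")>]":
--             depth -= 1
--         elif depth == 0 and text[i:i+2] == "->":
--             return i
--     return -1
-- ===== SOURCE B (Python) =====
-- def _find_arrow(text: str) -> int:
--     """Find -> respecting brackets: prefix-depth table, then a flat scan."""
--     n = len(text)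
--     depth_before = [0] * n
--     d = 0
--     for i, ch in enumerate(text):
--         depth_before[i] = d
--         if ch in "(<[":
--             d += 1
--         elif ch in ")>]":
--             d -= 1
--     for i in range(n - 1):
--         if depth_before[i] == 0 and text[i:i+2] == "->":
--             return i
--     return -1
-- ===== Notes on version B (the rewrite author's own statement) =====
-- stated objective: alternative
-- what changed: Replaces the single stateful loop (running depth counter with early return) by two separate passes: first a prefix table of the bracket depth strictly before each position, then a flat scan returning the first position whose table entry is zero and which starts the arrow delimiter.
import Mathlib
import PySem

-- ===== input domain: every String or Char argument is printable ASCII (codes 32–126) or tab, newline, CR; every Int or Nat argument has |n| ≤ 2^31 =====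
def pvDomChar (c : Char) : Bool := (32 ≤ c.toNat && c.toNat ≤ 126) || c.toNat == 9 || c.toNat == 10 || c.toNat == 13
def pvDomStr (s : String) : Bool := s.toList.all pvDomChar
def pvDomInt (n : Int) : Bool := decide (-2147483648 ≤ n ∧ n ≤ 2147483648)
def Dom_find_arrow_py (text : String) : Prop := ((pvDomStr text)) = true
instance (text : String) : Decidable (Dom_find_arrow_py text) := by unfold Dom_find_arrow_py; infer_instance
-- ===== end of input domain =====

-- B replaces A's single stateful loop (running depth, early return) by two passes:
-- a prefix depth-before table, then a flat scan for the first top-level "->".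

-- ===== PORT A =====
-- A's index loop over range(len(text)-1) with running depth; the list view
-- c :: c2 :: rest exposes text[i] (= c) and text[i:i+2] (= [c, c2]), exact since
-- the loop stops before the last index.
def findArrowGoA : List Char → Int → Nat → Int
  | [], _, _ => -1
  | [_], _, _ => -1
  | c :: c2 :: rest, depth, i =>
      if c = '(' ∨ c = '<' ∨ c = '[' then findArrowGoA (c2 :: rest) (depth + 1) (i + 1)
      else if c = ')' ∨ c = '>' ∨ c = ']' then findArrowGoA (c2 :: rest) (depth - 1) (i + 1)
      else if depth = 0 ∧ c = '-' ∧ c2 = '>' then (i : Int)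
      else findArrowGoA (c2 :: rest) depth (i + 1)

def find_arrow_py (text : String) : Int := findArrowGoA text.toList 0 0

-- ===== PORT B =====
-- pass 1: depth_before table (depth strictly before each position)
def pvDelta (c : Char) : Int :=
  if c = '(' ∨ c = '<' ∨ c = '[' then 1
  else if c = ')' ∨ c = '>' ∨ c = ']' then -1
  else 0

def pvDepths : List Char → Int → List Int
  | [], _ => []
  | c :: rest, d => d :: pvDepths rest (d + pvDelta c)

-- pass 2: flat scan pairing each position (short of the last) with its table entry
def pvScanB : List Char → List Int → Nat → Int
  | c :: c2 :: rest, d :: ds, i =>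
      if d = 0 ∧ c = '-' ∧ c2 = '>' then (i : Int) else pvScanB (c2 :: rest) ds (i + 1)
  | _, _, _ => -1

def find_arrow_py_alt (text : String) : Int :=
  pvScanB text.toList (pvDepths text.toList 0) 0

-- ===== PRECONDITION & SPEC =====
def Spec_find_arrow_py (text : String) (out : Int) : Prop := out = find_arrow_py_alt text
instance (text : String) (out : Int) : Decidable (Spec_find_arrow_py text out) := by unfold Spec_find_arrow_py; infer_instance

-- ===== CLAIM (what is proved, stated in full; the proofs are below) =====
def Claim_equal_find_arrow_py : Prop := ∀ (text : String), Dom_find_arrow_py text → Spec_find_arrow_py text (find_arrow_py text)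

-- ===== LEMMAS AND PROOFS =====
theorem goA_eq_scanB : ∀ (cs : List Char) (d : Int) (i : Nat),
    findArrowGoA cs d i = pvScanB cs (pvDepths cs d) i := by
  intro cs
  induction cs with
  | nil => intro d i; rfl
  | cons c rest ih =>
    intro d i
    cases rest with
    | nil => rfl
    | cons c2 rest' =>
      simp only [findArrowGoA, pvDepths, pvScanB]
      by_cases h1 : c = '(' ∨ c = '<' ∨ c = '['
      · have hd : pvDelta c = 1 := by simp [pvDelta, h1]
        have hc : ¬ c = '-' := by rcases h1 with h | h | h <;> simp [h]
        simp [h1, hd, hc, ih, pvDepths]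
      · by_cases h2 : c = ')' ∨ c = '>' ∨ c = ']'
        · have hd : pvDelta c = -1 := by simp [pvDelta, h1, h2]
          have hc : ¬ c = '-' := by rcases h2 with h | h | h <;> simp [h]
          simp [h1, h2, hd, hc, ih, pvDepths, sub_eq_add_neg]
        · have hd : pvDelta c = 0 := by simp [pvDelta, h1, h2]
          by_cases h3 : d = 0 ∧ c = '-' ∧ c2 = '>'
          · simp [h3]
          · simp [h1, h2, h3, hd, ih, pvDepths]

-- ===== VERDICT (by name: the statement is the Claim_ definition above) =====
theorem find_arrow_py_spec : Claim_equal_find_arrow_py := by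
  intro text _
  unfold Spec_find_arrow_py find_arrow_py find_arrow_py_alt
  exact goA_eq_scanB _ _ _
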